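-- pv_equiv track=rewrite | github.com/San-Leandro-High-Makers-Club/cosmos-unknown | challenges.py | duplicate_node_count
-- ===== SOURCE A (Python) =====
-- from typing import List, Dict, Tuple, Set, Union
--
-- def duplicate_node_count(levels: List[List[str]]) -> int:
--     unique_node_names: List[str] = []
--     for level in levels:
--         for node in level:
--             if node not in unique_node_names:
--                 unique_node_names.append(node)
--     count = 0
--     for name in unique_node_names:
--         num_instances_of_name = 0
--         for level in levels:
--             for node in level:
--                 if name == node:
--                     num_instances_of_name += 1
--         count += num_instances_of_name - 1  # ignore the unique instance
--     return count
-- ===== SOURCE B (Python) =====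
-- def duplicate_node_count(levels):
--     flat = sorted(node for level in levels for node in level)
--     count = 0
--     for prev, cur in zip(flat, flat[1:]):
--         if prev == cur:
--             count += 1
--     return count
-- ===== Notes on version B (the rewrite author's own statement) =====
-- stated objective: faster
-- what changed: Replaces A's quadratic unique-list build plus a full nested rescan per unique name with flatten, sort once, and a single adjacent-equality scan (duplicates = total - distinct).
import Mathlib
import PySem

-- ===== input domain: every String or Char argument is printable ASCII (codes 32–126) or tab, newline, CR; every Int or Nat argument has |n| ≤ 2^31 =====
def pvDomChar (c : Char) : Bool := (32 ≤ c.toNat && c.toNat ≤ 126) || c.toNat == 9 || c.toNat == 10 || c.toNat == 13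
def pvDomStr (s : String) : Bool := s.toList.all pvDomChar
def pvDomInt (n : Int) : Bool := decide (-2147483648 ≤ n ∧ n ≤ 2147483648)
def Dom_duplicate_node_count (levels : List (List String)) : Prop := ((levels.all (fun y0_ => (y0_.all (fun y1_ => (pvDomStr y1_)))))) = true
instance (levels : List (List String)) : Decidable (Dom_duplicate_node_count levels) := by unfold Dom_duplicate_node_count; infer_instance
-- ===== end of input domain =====

-- B replaces A's quadratic unique-list build and per-name full rescan with flatten + sort once +
-- one adjacent-equality scan (objective: faster, O(n log n) vs O(n^2)); neither mutates `levels`.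

-- ===== PORT A =====
def duplicate_node_count (levels : List (List String)) : Int :=
  let unique_node_names : List String :=
    levels.foldl (fun acc level =>
      level.foldl (fun acc node => if node ∈ acc then acc else acc ++ [node]) acc) []
  unique_node_names.foldl (fun count name =>
    let num_instances_of_name : Int :=
      levels.foldl (fun k level =>
        level.foldl (fun k node => if name = node then k + 1 else k) k) 0
    count + (num_instances_of_name - 1)) 0

-- ===== PORT B =====
-- flat[1:] on a list is List.drop 1 (exact for the nonnegative literal slice start 1)
def duplicate_node_count_alt (levels : List (List String)) : Int :=
  let flat := PySem.List.sorted (levels.flatMap (fun level => level)) (fun x => x) false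
  (flat.zip (flat.drop 1)).foldl (fun count p => if p.1 = p.2 then count + 1 else count) 0

-- ===== PRECONDITION & SPEC =====
def Spec_duplicate_node_count (levels : List (List String)) (out : Int) : Prop := out = duplicate_node_count_alt levels
instance (levels : List (List String)) (out : Int) : Decidable (Spec_duplicate_node_count levels out) := by unfold Spec_duplicate_node_count; infer_instance

-- ===== CLAIM (what is proved, stated in full; the proofs are below) =====
def Claim_equal_duplicate_node_count : Prop := ∀ (levels : List (List String)), Dom_duplicate_node_count levels → Spec_duplicate_node_count levels (duplicate_node_count levels)

-- ===== LEMMAS AND PROOFS =====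

-- counting fold over one level, generalized initial accumulator
theorem count_fold_one (name : String) (l : List String) (k : Int) :
    l.foldl (fun k node => if name = node then k + 1 else k) k = k + l.count name := by
  induction l generalizing k with
  | nil => simp
  | cons x t ih =>
      by_cases h : name = x
      · subst h
        rw [List.foldl_cons, if_pos rfl, ih, List.count_cons_self]
        push_cast
        ring
      · rw [List.foldl_cons, if_neg h, ih, List.count_cons_of_ne (by exact fun e => h e.symm)]

-- the nested counting fold over all levels counts occurrences in the flattening
theorem count_fold (name : String) (levels : List (List String)) (k : Int) :
    levels.foldl (fun k level => level.foldl (fun k node => if name = node then k + 1 else k) k) k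
      = k + ((levels.flatMap (fun level => level)).count name : Int) := by
  induction levels generalizing k with
  | nil => simp
  | cons l ls ih =>
      rw [List.foldl_cons, count_fold_one, ih]
      simp [List.count_append]
      ring

-- the unique-list fold: a nodup accumulator gaining the membership of the traversed list
theorem unique_fold_one (l acc : List String) (hnd : acc.Nodup) :
    (l.foldl (fun acc node => if node ∈ acc then acc else acc ++ [node]) acc).Nodup ∧
    (∀ x, x ∈ l.foldl (fun acc node => if node ∈ acc then acc else acc ++ [node]) acc ↔ x ∈ acc ∨ x ∈ l) := by
  induction l generalizing acc with
  | nil => simpa using hnd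
  | cons y t ih =>
      simp only [List.foldl_cons]
      by_cases h : y ∈ acc
      · simp only [if_pos h]
        obtain ⟨h1, h2⟩ := ih acc hnd
        refine ⟨h1, fun x => ?_⟩
        rw [h2 x]
        simp only [List.mem_cons]
        constructor
        · tauto
        · rintro (hx | rfl | hx) <;> tauto
      · simp only [if_neg h]
        have hnd' : (acc ++ [y]).Nodup := by
          simp [List.nodup_append, hnd]
          intro a ha hay
          exact h (hay ▸ ha)
        obtain ⟨h1, h2⟩ := ih _ hnd'
        refine ⟨h1, fun x => ?_⟩
        rw [h2 x]
        simp only [List.mem_append, List.mem_cons]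
        tauto

theorem unique_fold (levels : List (List String)) (acc : List String) (hnd : acc.Nodup) :
    (levels.foldl (fun acc level => level.foldl (fun acc node => if node ∈ acc then acc else acc ++ [node]) acc) acc).Nodup ∧
    (∀ x, x ∈ levels.foldl (fun acc level => level.foldl (fun acc node => if node ∈ acc then acc else acc ++ [node]) acc) acc
        ↔ x ∈ acc ∨ x ∈ levels.flatMap (fun level => level)) := by
  induction levels generalizing acc with
  | nil => simpa using hnd
  | cons l ls ih =>
      obtain ⟨h1, h2⟩ := unique_fold_one l acc hnd
      obtain ⟨g1, g2⟩ := ih _ h1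
      refine ⟨g1, fun x => ?_⟩
      simp only [List.foldl_cons]
      rw [g2 x, h2 x]
      simp [or_assoc]

-- summing fold with generalized accumulator
theorem sum_fold (u : List String) (g : String → Int) (n : Int) :
    u.foldl (fun c x => c + (g x - 1)) n = n + (u.map g).sum - u.length := by
  induction u generalizing n with
  | nil => simp
  | cons x t ih =>
      rw [List.foldl_cons, ih]
      simp
      ring

-- pointwise-equal fold bodies on the traversed list give equal folds
theorem foldl_congr_on {α β : Type} (l : List α) (f g : β → α → β) (b : β)
    (h : ∀ acc x, x ∈ l → f acc x = g acc x) : l.foldl f b = l.foldl g b := by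
  induction l generalizing b with
  | nil => rfl
  | cons x t ih =>
      rw [List.foldl_cons, List.foldl_cons, h b x (by simp)]
      exact ih _ (fun acc y hy => h acc y (List.mem_cons_of_mem _ hy))

-- cast of a Nat-valued sum
theorem sum_map_cast (l : List String) (f : String → Nat) :
    (l.map (fun x => (f x : Int))).sum = ((l.map f).sum : Int) := by
  induction l with
  | nil => simp
  | cons x t ih => simp [ih]

-- A computes total − distinct over the flattening
theorem portA_closed (levels : List (List String)) :
    duplicate_node_count levels
      = ((levels.flatMap (fun level => level)).length : Int)
        - ((levels.flatMap (fun level => level)).dedup.length : Int) := by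
  unfold duplicate_node_count
  set flat := levels.flatMap (fun level => level) with hflat
  obtain ⟨hnd, hmem⟩ := unique_fold levels [] (by simp)
  set u := levels.foldl (fun acc level => level.foldl (fun acc node => if node ∈ acc then acc else acc ++ [node]) acc) [] with hu
  have hperm : u.Perm flat.dedup := by
    rw [List.perm_ext_iff_of_nodup hnd (List.nodup_dedup flat)]
    intro a
    rw [List.mem_dedup]
    have := hmem a
    simp only [List.not_mem_nil, false_or] at this
    exact this
  have hsum : (u.map (fun name => (flat.count name : Int))).sum = (flat.length : Int) := by
    rw [(hperm.map (fun name => (flat.count name : Int))).sum_eq, sum_map_cast,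
      List.sum_map_count_dedup_eq_length flat]
  have hlen : u.length = flat.dedup.length := hperm.length_eq
  calc u.foldl (fun count name =>
          count + ((levels.foldl (fun k level => level.foldl (fun k node => if name = node then k + 1 else k) k) 0) - 1)) 0
      = u.foldl (fun count name => count + ((flat.count name : Int) - 1)) 0 := by
        refine foldl_congr_on u _ _ 0 (fun acc x _hx => ?_)
        rw [count_fold x levels 0, hflat]
        ring
    _ = 0 + (u.map (fun name => (flat.count name : Int))).sum - u.length := sum_fold u _ 0
    _ = (flat.length : Int) - (flat.dedup.length : Int) := by rw [hsum, hlen]; ring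

-- adjacent-equality fold with generalized accumulator
theorem adj_fold (l : List (String × String)) (n : Int) :
    l.foldl (fun count p => if p.1 = p.2 then count + 1 else count) n
      = n + (l.countP (fun p => p.1 == p.2) : Int) := by
  induction l generalizing n with
  | nil => simp
  | cons p t ih =>
      by_cases h : p.1 = p.2
      · rw [List.foldl_cons, if_pos h, ih, List.countP_cons]
        simp [h]
        ring
      · rw [List.foldl_cons, if_neg h, ih, List.countP_cons]
        simp [h]

-- on a ≤-sorted list, the adjacent equal pairs count total − distinct
theorem adj_sorted (s : List String) (hs : s.Pairwise (· ≤ ·)) :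
    ((s.zip (s.drop 1)).countP (fun p => p.1 == p.2)) + s.dedup.length = s.length := by
  induction s with
  | nil => simp
  | cons x t ih =>
      match t, ih with
      | [], _ => simp
      | y :: t', ih =>
          have hxy : x ≤ y := (List.pairwise_cons.1 hs).1 y (by simp)
          have hrest : (y :: t').Pairwise (· ≤ ·) := (List.pairwise_cons.1 hs).2
          have ih2 : ((y :: t').zip t').countP (fun p => p.1 == p.2) + (y :: t').dedup.length
              = (y :: t').length := by simpa using ih hrest
          have hzip : ((x :: y :: t').zip ((x :: y :: t').drop 1))
              = (x, y) :: ((y :: t').zip t') := by simp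
          by_cases h : x = y
          · have hdd : (x :: y :: t').dedup = (y :: t').dedup :=
              List.dedup_cons_of_mem (by simp [h])
            rw [hzip, List.countP_cons, hdd]
            simp only [h, beq_self_eq_true, if_true, List.length_cons]
            simp only [List.length_cons] at ih2
            omega
          · have hxnot : x ∉ y :: t' := by
              intro hx
              rcases List.mem_cons.1 hx with rfl | hx
              · exact h rfl
              · have hyx : y ≤ x := (List.pairwise_cons.1 hrest).1 x hx
                exact h (le_antisymm hxy hyx)
            have hdd : (x :: y :: t').dedup = x :: (y :: t').dedup :=
              List.dedup_cons_of_notMem hxnot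
            have hne : (x == y) = false := by simpa using h
            rw [hzip, List.countP_cons, hdd]
            simp only [hne, List.length_cons, Bool.false_eq_true, if_false]
            simp only [List.length_cons] at ih2
            omega

-- B computes total − distinct over the flattening as well
theorem portB_closed (levels : List (List String)) :
    duplicate_node_count_alt levels
      = ((levels.flatMap (fun level => level)).length : Int)
        - ((levels.flatMap (fun level => level)).dedup.length : Int) := by
  unfold duplicate_node_count_alt
  set flat0 := levels.flatMap (fun level => level) with hflat0
  set s := PySem.List.sorted flat0 (fun x => x) false with hs
  have hperm : s.Perm flat0 := PySem.List.sorted_perm flat0 (fun x => x) false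
  have hpair : s.Pairwise (· ≤ ·) := by
    simpa using PySem.List.sorted_pairwise flat0 (fun x => x)
  have hkey := adj_sorted s hpair
  rw [adj_fold]
  have hlen : s.length = flat0.length := hperm.length_eq
  have hded : s.dedup.length = flat0.dedup.length := hperm.dedup.length_eq
  omega

-- ===== VERDICT (by name: the statement is the Claim_ definition above) =====
theorem duplicate_node_count_spec : Claim_equal_duplicate_node_count := by
  intro levels _
  unfold Spec_duplicate_node_count
  rw [portA_closed, portB_closed]
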